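-- pv_equiv track=rewrite | github.com/Tianrun-Yu/LIMO | Q1/score_gnorm_baseline.py | get_sua
-- ===== SOURCE A (Python) =====
-- from typing import Dict, List, Optional, Tuple
--
-- def get_sua(messages: List[Dict]) -> Tuple[str, str, str]:
--     sys_c = user_c = asst_c = ""
--     for m in messages:
--         r = m.get("role", "")
--         c = m.get("content", "")
--         if r == "system":      sys_c = c
--         elif r == "user":      user_c = c
--         elif r == "assistant": asst_c = c
--     return sys_c, user_c, asst_c
-- ===== SOURCE B (Python) =====
-- def get_sua(messages):
--     wanted = {"system", "user", "assistant"}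
--     out = {"system": "", "user": "", "assistant": ""}
--     for m in reversed(messages):
--         r = m.get("role", "")
--         if r in wanted:
--             out[r] = m.get("content", "")
--             wanted.remove(r)
--             if not wanted:
--                 break
--     return out["system"], out["user"], out["assistant"]
-- ===== Notes on version B (the rewrite author's own statement) =====
-- stated objective: alternative
-- what changed: B scans the messages in reverse, recording each role's content only at its first (i.e. last-overall) occurrence and breaking as soon as all three roles are found, instead of A's forward scan that overwrites each slot on every occurrence.
import Mathlib
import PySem

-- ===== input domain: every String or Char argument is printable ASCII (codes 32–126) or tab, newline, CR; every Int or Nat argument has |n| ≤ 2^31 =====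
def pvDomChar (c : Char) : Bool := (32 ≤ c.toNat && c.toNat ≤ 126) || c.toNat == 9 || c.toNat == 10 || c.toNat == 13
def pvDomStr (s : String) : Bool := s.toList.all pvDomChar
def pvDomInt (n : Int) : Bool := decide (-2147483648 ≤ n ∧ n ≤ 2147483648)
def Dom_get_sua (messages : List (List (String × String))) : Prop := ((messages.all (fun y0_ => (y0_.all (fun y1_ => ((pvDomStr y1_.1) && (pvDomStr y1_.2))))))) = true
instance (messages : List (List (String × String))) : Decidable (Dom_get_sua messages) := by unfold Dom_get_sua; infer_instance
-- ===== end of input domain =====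

-- B scans the messages in reverse keeping the first (= last overall) content per role, with an
-- early exit once all three roles are filled; same return value as A's forward overwrite scan.


-- shared primitive: Python's m.get(k, d) on an association-list dict (first match)
def pvGetD (m : List (String × String)) (k d : String) : String :=
  match m with
  | [] => d
  | (k', v) :: rest => if k' == k then v else pvGetD rest k d

-- ===== PORT A =====
def get_sua (messages : List (List (String × String))) : String × String × String :=
  messages.foldl
    (fun acc m =>
      let r := pvGetD m "role" ""
      let c := pvGetD m "content" ""
      if r == "system" then (c, acc.2.1, acc.2.2)
      else if r == "user" then (acc.1, c, acc.2.2)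
      else if r == "assistant" then (acc.1, acc.2.1, c)
      else acc)
    ("", "", "")

-- ===== PORT B =====
-- the three Option slots are Source B's `out` dict together with the `wanted` set:
-- none = role still wanted, some c = recorded content; the isSome test is the `break`.
def get_sua_alt_go : List (List (String × String)) → Option String → Option String → Option String → String × String × String
  | [], s, u, a => (s.getD "", u.getD "", a.getD "")
  | m :: rest, s, u, a =>
    if s.isSome && u.isSome && a.isSome then (s.getD "", u.getD "", a.getD "")
    else
      let r := pvGetD m "role" ""
      if r == "system" && s.isNone then get_sua_alt_go rest (some (pvGetD m "content" "")) u a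
      else if r == "user" && u.isNone then get_sua_alt_go rest s (some (pvGetD m "content" "")) a
      else if r == "assistant" && a.isNone then get_sua_alt_go rest s u (some (pvGetD m "content" ""))
      else get_sua_alt_go rest s u a

def get_sua_alt (messages : List (List (String × String))) : String × String × String :=
  get_sua_alt_go messages.reverse none none none

-- ===== PRECONDITION & SPEC =====
def Spec_get_sua (messages : List (List (String × String))) (out : String × String × String) : Prop := out = get_sua_alt messages
instance (messages : List (List (String × String))) (out : String × String × String) : Decidable (Spec_get_sua messages out) := by unfold Spec_get_sua; infer_instance

-- ===== CLAIM (what is proved, stated in full; the proofs are below) =====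
def Claim_equal_get_sua : Prop := ∀ (messages : List (List (String × String))), Dom_get_sua messages → Spec_get_sua messages (get_sua messages)

-- ===== LEMMAS AND PROOFS =====

-- first content in l whose role is `role`, default d
def firstRoleD (role : String) : List (List (String × String)) → String → String
  | [], d => d
  | m :: rest, d =>
    if pvGetD m "role" "" == role then pvGetD m "content" "" else firstRoleD role rest d

theorem firstRoleD_append_singleton (role : String) (l : List (List (String × String)))
    (m : List (String × String)) (d : String) :
    firstRoleD role (l ++ [m]) d
      = firstRoleD role l (if pvGetD m "role" "" == role then pvGetD m "content" "" else d) := by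
  induction l with
  | nil => simp [firstRoleD]
  | cons x xs ih => simp only [List.cons_append, firstRoleD, ih]

theorem get_sua_foldl (xs : List (List (String × String))) :
    ∀ init : String × String × String,
      xs.foldl
        (fun acc m =>
          let r := pvGetD m "role" ""
          let c := pvGetD m "content" ""
          if r == "system" then (c, acc.2.1, acc.2.2)
          else if r == "user" then (acc.1, c, acc.2.2)
          else if r == "assistant" then (acc.1, acc.2.1, c)
          else acc)
        init
      = (firstRoleD "system" xs.reverse init.1,
         firstRoleD "user" xs.reverse init.2.1,
         firstRoleD "assistant" xs.reverse init.2.2) := by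
  induction xs with
  | nil => intro init; simp [firstRoleD]
  | cons m rest ih =>
    intro init
    rw [List.foldl_cons, ih]
    simp only [List.reverse_cons, firstRoleD_append_singleton]
    by_cases hs : pvGetD m "role" "" = "system"
    · simp [hs]
    · by_cases hu : pvGetD m "role" "" = "user"
      · simp [hu]
      · by_cases ha : pvGetD m "role" "" = "assistant"
        · simp [ha]
        · simp [hs, hu, ha]

theorem get_sua_alt_go_eq (l : List (List (String × String))) :
    ∀ s u a : Option String,
      get_sua_alt_go l s u a
        = (s.getD (firstRoleD "system" l ""),
           u.getD (firstRoleD "user" l ""),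
           a.getD (firstRoleD "assistant" l "")) := by
  induction l with
  | nil => intro s u a; simp [get_sua_alt_go, firstRoleD]
  | cons m rest ih =>
    intro s u a
    by_cases hfull : (s.isSome && u.isSome && a.isSome) = true
    · obtain ⟨⟨hs1, hu1⟩, ha1⟩ := by simpa using hfull
      obtain ⟨sv, rfl⟩ := Option.isSome_iff_exists.mp hs1
      obtain ⟨uv, rfl⟩ := Option.isSome_iff_exists.mp hu1
      obtain ⟨av, rfl⟩ := Option.isSome_iff_exists.mp ha1
      simp [get_sua_alt_go]
    · rw [get_sua_alt_go, if_neg hfull]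
      by_cases hs : pvGetD m "role" "" = "system"
      · cases s <;> simp [hs, ih, firstRoleD]
      · by_cases hu : pvGetD m "role" "" = "user"
        · cases u <;> simp [hu, ih, firstRoleD]
        · by_cases ha : pvGetD m "role" "" = "assistant"
          · cases a <;> simp [ha, ih, firstRoleD]
          · simp [hs, hu, ha, ih, firstRoleD]

-- ===== VERDICT (by name: the statement is the Claim_ definition above) =====
theorem get_sua_spec : Claim_equal_get_sua := by
  intro messages _
  unfold Spec_get_sua get_sua get_sua_alt
  rw [get_sua_foldl, get_sua_alt_go_eq]
  simp
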